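-- pv_equiv track=rewrite | github.com/prakashtomita510-dev/SuperMew | eval/scripts/build_silver_smoke_subset.py | build_subset
-- ===== SOURCE A (Python) =====
-- from collections import Counter
-- from typing import Any
--
-- def build_subset(rows: list[dict[str, Any]], targets: dict[str, int]) -> list[dict[str, Any]]:
--     counts = Counter()
--     selected = []
--     for row in rows:
--         question_type = str(row.get("question_type") or "")
--         if counts[question_type] >= targets.get(question_type, 0):
--             continue
--         selected.append(row)
--         counts[question_type] += 1
--         if all(counts[key] >= value for key, value in targets.items()):
--             break
--     return selected
-- ===== SOURCE B (Python) =====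
-- def build_subset(rows, targets):
--     # Filter by occurrence rank: the k-th row (0-based) of a question type is kept
--     # iff k < that type's target.  The original's early break is redundant: once
--     # every target is met, no further row can qualify.
--     occ = {}
--     keep = []
--     for row in rows:
--         qt = str(row.get("question_type") or "")
--         k = occ.get(qt, 0)
--         occ[qt] = k + 1
--         keep.append(k < targets.get(qt, 0))
--     return [row for row, ok in zip(rows, keep) if ok]
-- ===== Notes on version B (the rewrite author's own statement) =====
-- stated objective: alternative
-- what changed: Replaces the quota scan (counter of selected rows, all(...) rescan of every target after each selection, early break) by a staged occurrence-rank filter: one pass records, for each row, whether its 0-based occurrence rank within its question type is below the type's target, then a comprehension keeps the flagged rows; the break is proved redundant.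
import Mathlib
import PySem

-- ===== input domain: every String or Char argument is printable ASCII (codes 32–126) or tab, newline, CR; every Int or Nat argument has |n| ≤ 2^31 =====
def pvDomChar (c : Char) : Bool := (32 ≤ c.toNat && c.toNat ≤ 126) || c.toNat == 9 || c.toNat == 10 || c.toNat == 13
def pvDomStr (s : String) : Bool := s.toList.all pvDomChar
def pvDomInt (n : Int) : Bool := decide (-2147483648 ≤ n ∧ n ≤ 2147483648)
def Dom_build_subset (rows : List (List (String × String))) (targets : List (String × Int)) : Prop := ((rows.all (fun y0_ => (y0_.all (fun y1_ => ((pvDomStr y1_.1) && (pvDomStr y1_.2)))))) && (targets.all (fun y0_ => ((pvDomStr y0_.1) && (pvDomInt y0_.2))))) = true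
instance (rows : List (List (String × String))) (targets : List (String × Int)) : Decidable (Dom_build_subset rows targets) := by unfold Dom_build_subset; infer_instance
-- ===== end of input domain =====

-- B replaces A's quota scan with break by a staged occurrence-rank filter
-- (keep the k-th row of a type iff k < its target); the break is proved redundant.


-- ===== PORT A =====
-- str(row.get("question_type") or ""): None and "" both yield ""; str of a str is itself.
def qtypeOf (row : List (String × String)) : String :=
  match (PySem.Dict.mk row).get? "question_type" with
  | none => ""
  | some s => if s = "" then "" else s

-- all(counts[key] >= value for key, value in targets.items())
def allSat (counts : PySem.Dict String Int) (targets : List (String × Int)) : Bool :=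
  targets.all (fun p => decide (counts.getD p.1 0 ≥ p.2))

def goA (targets : List (String × Int)) :
    List (List (String × String)) → PySem.Dict String Int →
    List (List (String × String)) → List (List (String × String))
  | [], _, selected => selected
  | row :: rest, counts, selected =>
    let qt := qtypeOf row
    if counts.getD qt 0 ≥ (PySem.Dict.mk targets).getD qt 0 then
      goA targets rest counts selected
    else
      -- counts[qt] += 1  (Counter increment)
      let counts' := counts.modify qt 0 (· + 1)
      let selected' := selected ++ [row]
      if allSat counts' targets then selected' else goA targets rest counts' selected'

def build_subset (rows : List (List (String × String))) (targets : List (String × Int)) : List (List (String × String)) :=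
  goA targets rows PySem.Dict.empty []

-- ===== PORT B =====
-- first pass: keep flags by occurrence rank (k = occ.get(qt, 0); flag = k < target)
def goKeep (targets : List (String × Int)) :
    List (List (String × String)) → PySem.Dict String Int → List Bool
  | [], _ => []
  | row :: rest, occ =>
    let qt := qtypeOf row
    let k := occ.getD qt 0
    decide (k < (PySem.Dict.mk targets).getD qt 0) :: goKeep targets rest (occ.insert qt (k + 1))

def build_subset_alt (rows : List (List (String × String))) (targets : List (String × Int)) : List (List (String × String)) :=
  -- [row for row, ok in zip(rows, keep) if ok]
  ((rows.zip (goKeep targets rows PySem.Dict.empty)).filter (fun p => p.2)).map Prod.fst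

-- ===== PRECONDITION & SPEC =====
def Spec_build_subset (rows : List (List (String × String))) (targets : List (String × Int)) (out : List (List (String × String))) : Prop := out = build_subset_alt rows targets
instance (rows : List (List (String × String))) (targets : List (String × Int)) (out : List (List (String × String))) : Decidable (Spec_build_subset rows targets out) := by unfold Spec_build_subset; infer_instance

-- ===== CLAIM (what is proved, stated in full; the proofs are below) =====
def Claim_equal_build_subset : Prop := ∀ (rows : List (List (String × String))) (targets : List (String × Int)), Dom_build_subset rows targets → Spec_build_subset rows targets (build_subset rows targets)

-- ===== LEMMAS AND PROOFS =====

-- occ saturates the targets: every type already occurred at least its target many times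
def Sat (targets : List (String × Int)) (occ : PySem.Dict String Int) : Prop :=
  ∀ k, (PySem.Dict.mk targets).getD k 0 ≤ occ.getD k 0

lemma sat_insert (targets : List (String × Int)) (occ : PySem.Dict String Int)
    (qt : String) (h : Sat targets occ) :
    Sat targets (occ.insert qt (occ.getD qt 0 + 1)) := by
  intro k
  rw [PySem.Dict.getD_insert]
  split_ifs with hk
  · subst hk; have := h k; omega
  · exact h k

-- once saturated, the filter keeps nothing
lemma filter_nil_of_sat (targets : List (String × Int)) :
    ∀ (rows : List (List (String × String))) (occ : PySem.Dict String Int),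
      Sat targets occ →
      ((rows.zip (goKeep targets rows occ)).filter (fun p => p.2)).map Prod.fst = [] := by
  intro rows
  induction rows with
  | nil => intro occ _; rfl
  | cons row rest ih =>
    intro occ h
    have hflag : decide (occ.getD (qtypeOf row) 0 < (PySem.Dict.mk targets).getD (qtypeOf row) 0) = false := by
      simp only [decide_eq_false_iff_not, not_lt]
      exact h (qtypeOf row)
    simp only [goKeep, List.zip_cons_cons, List.filter_cons, hflag]
    exact ih _ (sat_insert targets occ (qtypeOf row) h)

-- if the first-match value is positive, the key is present with that value
lemma mem_of_getD_pos (targets : List (String × Int)) (k : String)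
    (h : 0 < (PySem.Dict.mk targets).getD k 0) :
    (k, (PySem.Dict.mk targets).getD k 0) ∈ targets := by
  cases hg : (PySem.Dict.mk targets).get? k with
  | none =>
    rw [PySem.Dict.getD_eq_get?_getD, hg] at h
    exact absurd h (by norm_num)
  | some v =>
    rw [PySem.Dict.getD_eq_get?_getD, hg]
    exact PySem.Dict.mem_items_of_get?_eq_some _ hg

-- all(counts ≥ targets) under the invariant forces saturation of the occurrence counts
lemma sat_of_allSat (targets : List (String × Int)) (counts occ : PySem.Dict String Int)
    (hNN : ∀ k, 0 ≤ occ.getD k 0)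
    (hInv : ∀ k, counts.getD k 0 = min (occ.getD k 0) (max ((PySem.Dict.mk targets).getD k 0) 0))
    (hA : allSat counts targets = true) : Sat targets occ := by
  intro k
  by_cases ht : (PySem.Dict.mk targets).getD k 0 ≤ 0
  · have := hNN k; omega
  · rw [not_le] at ht
    have hmem := mem_of_getD_pos targets k ht
    have := (List.all_eq_true.mp hA) _ hmem
    simp only [decide_eq_true_eq] at this
    have hc := hInv k
    omega

-- main invariant: A's counter of selected rows is the occurrence count capped at the target
lemma goA_eq_filter (targets : List (String × Int)) :
    ∀ (rows : List (List (String × String))) (counts occ : PySem.Dict String Int)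
      (selected : List (List (String × String))),
      (∀ k, 0 ≤ occ.getD k 0) →
      (∀ k, counts.getD k 0 = min (occ.getD k 0) (max ((PySem.Dict.mk targets).getD k 0) 0)) →
      goA targets rows counts selected
        = selected ++ ((rows.zip (goKeep targets rows occ)).filter (fun p => p.2)).map Prod.fst := by
  intro rows
  induction rows with
  | nil => intro _ _ selected _ _; simp [goA]
  | cons row rest ih =>
    intro counts occ selected hNN hInv
    set qt := qtypeOf row with hqt
    set t := (PySem.Dict.mk targets).getD qt 0 with htd
    set k := occ.getD qt 0 with hkd
    have hc : counts.getD qt 0 = min k (max t 0) := hInv qt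
    have hk0 : 0 ≤ k := hNN qt
    have hNN' : ∀ k', 0 ≤ (occ.insert qt (k + 1)).getD k' 0 := by
      intro k'
      rw [PySem.Dict.getD_insert]
      split_ifs with h
      · omega
      · exact hNN k'
    by_cases hsel : k < t
    · -- selected branch: guard false, flag true
      have hguard : ¬ (counts.getD qt 0 ≥ t) := by rw [hc]; omega
      have hInv' : ∀ k', (counts.modify qt 0 (· + 1)).getD k' 0
          = min ((occ.insert qt (k + 1)).getD k' 0) (max ((PySem.Dict.mk targets).getD k' 0) 0) := by
        intro k'
        rw [PySem.Dict.getD_modify, PySem.Dict.getD_insert]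
        split_ifs with h
        · subst h; rw [hc, ← htd]; omega
        · exact hInv k'
      show (if counts.getD qt 0 ≥ t then _ else _) = _
      rw [if_neg hguard]
      simp only [goKeep, ← hqt, ← hkd, ← htd, List.zip_cons_cons, List.filter_cons,
        decide_eq_true hsel, reduceIte, List.map_cons]
      by_cases hall : allSat (counts.modify qt 0 (· + 1)) targets = true
      · rw [if_pos hall,
          filter_nil_of_sat targets rest _ (sat_of_allSat targets _ _ hNN' hInv' hall)]
      · rw [if_neg hall, ih _ _ (selected ++ [row]) hNN' hInv']
        simp
    · -- skipped branch: guard true, flag false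
      have hguard : counts.getD qt 0 ≥ t := by rw [hc]; omega
      have hInv' : ∀ k', counts.getD k' 0
          = min ((occ.insert qt (k + 1)).getD k' 0) (max ((PySem.Dict.mk targets).getD k' 0) 0) := by
        intro k'
        rw [PySem.Dict.getD_insert]
        split_ifs with h
        · subst h; rw [hc, ← htd]; omega
        · exact hInv k'
      show (if counts.getD qt 0 ≥ t then _ else _) = _
      rw [if_pos hguard]
      simp only [goKeep, ← hqt, ← hkd, ← htd, List.zip_cons_cons, List.filter_cons,
        decide_eq_false (by omega : ¬ k < t)]
      exact ih _ _ selected hNN' hInv'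

-- ===== VERDICT (by name: the statement is the Claim_ definition above) =====
theorem build_subset_spec : Claim_equal_build_subset := by
  intro rows targets _
  unfold Spec_build_subset build_subset build_subset_alt
  rw [goA_eq_filter targets rows PySem.Dict.empty PySem.Dict.empty []
    (fun k => by simp [PySem.Dict.getD_empty])
    (fun k => by simp [PySem.Dict.getD_empty])]
  rfl
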